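-- pv_equiv track=rewrite | github.com/ArturMosk/Python_Basic-Skillbox- | Module19/05_frequency_hist_2/main.py | form_histogramma_inverted
-- ===== SOURCE A (Python) =====
-- def form_histogramma_inverted(histogramma):
--     histogramma_inverted = dict()
--     frequency = set(histogramma.values())
--     for element in frequency:
--         letters = []
--         for letter, freq in histogramma.items():
--             if freq == element:
--                 letters.append(letter)
--         histogramma_inverted[element] = letters
--
--     return histogramma_inverted
-- ===== SOURCE B (Python) =====
-- def form_histogramma_inverted(histogramma):
--     # single distribution pass instead of one full scan per distinct frequency
--     histogramma_inverted = {element: [] for element in set(histogramma.values())}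
--     for letter, freq in histogramma.items():
--         histogramma_inverted[freq].append(letter)
--     return histogramma_inverted
-- ===== Notes on version B (the rewrite author's own statement) =====
-- stated objective: faster
-- what changed: Instead of scanning the whole histogram once per distinct frequency (nested loops), B initializes one empty bucket per distinct frequency and distributes all letters in a single pass over the items.
import Mathlib
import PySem

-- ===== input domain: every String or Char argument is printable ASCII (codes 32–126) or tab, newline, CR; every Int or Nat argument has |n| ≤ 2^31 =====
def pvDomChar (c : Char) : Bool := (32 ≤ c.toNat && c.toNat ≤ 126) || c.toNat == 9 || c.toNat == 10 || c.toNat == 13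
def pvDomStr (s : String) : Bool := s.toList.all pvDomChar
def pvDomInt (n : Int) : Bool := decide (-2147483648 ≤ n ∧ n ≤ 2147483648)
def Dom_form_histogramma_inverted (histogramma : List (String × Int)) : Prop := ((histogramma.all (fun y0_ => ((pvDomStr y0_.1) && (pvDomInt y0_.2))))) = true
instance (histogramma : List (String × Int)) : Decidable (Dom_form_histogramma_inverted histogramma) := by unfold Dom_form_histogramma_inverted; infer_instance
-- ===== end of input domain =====

-- B replaces A's per-frequency full scans with one distribution pass over the items (faster when there are many distinct frequencies).


-- ===== PORT A =====
-- inner loop of A: letters of a given frequency, in item order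
def pvLettersA (histogramma : List (String × Int)) (element : Int) : List String :=
  histogramma.foldl (fun letters p => if p.2 == element then letters ++ [p.1] else letters) []

def form_histogramma_inverted (histogramma : List (String × Int)) : List (Int × List String) :=
  let frequency : PySem.Set Int := PySem.Set.ofList (histogramma.map (·.2))
  let histogramma_inverted :=
    frequency.foldl
      (fun inv element => inv.insert element (pvLettersA histogramma element))
      (PySem.Dict.empty : PySem.Dict Int (List String))
  histogramma_inverted.items

-- ===== PORT B =====
def form_histogramma_inverted_alt (histogramma : List (String × Int)) : List (Int × List String) :=
  let init :=
    (PySem.Set.ofList (histogramma.map (·.2))).foldl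
      (fun d element => d.insert element ([] : List String))
      (PySem.Dict.empty : PySem.Dict Int (List String))
  let result :=
    histogramma.foldl (fun d p => d.modify p.2 [] (fun letters => letters ++ [p.1])) init
  result.items

-- ===== PRECONDITION & SPEC =====
def Spec_form_histogramma_inverted (histogramma : List (String × Int)) (out : List (Int × List String)) : Prop := out = form_histogramma_inverted_alt histogramma
instance (histogramma : List (String × Int)) (out : List (Int × List String)) : Decidable (Spec_form_histogramma_inverted histogramma out) := by unfold Spec_form_histogramma_inverted; infer_instance

-- ===== CLAIM (what is proved, stated in full; the proofs are below) =====
def Claim_equal_form_histogramma_inverted : Prop := ∀ (histogramma : List (String × Int)), Dom_form_histogramma_inverted histogramma → Spec_form_histogramma_inverted histogramma (form_histogramma_inverted histogramma)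

-- ===== LEMMAS AND PROOFS =====
-- inverting one histogram: both ports build the same items list
lemma itemsA (h : List (String × Int)) :
    ((PySem.Set.ofList (h.map (·.2))).foldl
      (fun inv element => inv.insert element (pvLettersA h element))
      (PySem.Dict.empty : PySem.Dict Int (List String))).items
    = (PySem.Set.ofList (h.map (·.2))).map (fun e => (e, pvLettersA h e)) := by
  have := PySem.Dict.items_foldl_insert_fresh (PySem.Set.ofList (h.map (·.2))) id
    (pvLettersA h) (PySem.Dict.empty : PySem.Dict Int (List String))
    (fun a _ => PySem.Dict.contains_empty a)
    (by simp [PySem.Set.nodup_ofList (h.map (·.2))])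
  simpa using this

-- init items
lemma itemsInit (h : List (String × Int)) :
    ((PySem.Set.ofList (h.map (·.2))).foldl
      (fun d element => d.insert element ([] : List String))
      (PySem.Dict.empty : PySem.Dict Int (List String))).items
    = (PySem.Set.ofList (h.map (·.2))).map (fun e => (e, ([] : List String))) := by
  have := PySem.Dict.items_foldl_insert_fresh (PySem.Set.ofList (h.map (·.2))) id
    (fun _ => ([] : List String)) (PySem.Dict.empty : PySem.Dict Int (List String))
    (fun a _ => PySem.Dict.contains_empty a)
    (by simp [PySem.Set.nodup_ofList (h.map (·.2))])
  simpa using this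

-- B's result dict
lemma keysInit (h : List (String × Int)) :
    ((PySem.Set.ofList (h.map (·.2))).foldl
      (fun d element => d.insert element ([] : List String))
      (PySem.Dict.empty : PySem.Dict Int (List String))).keys
    = PySem.Set.ofList (h.map (·.2)) := by
  simp only [PySem.Dict.keys, itemsInit, List.map_map]
  exact List.map_id _

lemma keysResult (h : List (String × Int)) :
    (h.foldl (fun d p => d.modify p.2 [] (fun letters => letters ++ [p.1]))
      ((PySem.Set.ofList (h.map (·.2))).foldl
        (fun d element => d.insert element ([] : List String))
        (PySem.Dict.empty : PySem.Dict Int (List String)))).keys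
    = PySem.Set.ofList (h.map (·.2)) := by
  rw [PySem.Dict.keys_foldl_modify_key h (·.2) ([] : List String)
    (fun _ p => (fun letters => letters ++ [p.1])), keysInit,
    PySem.Set.update_eq_append_filter]
  rw [List.filter_eq_nil_iff.2 ?_]
  · simp
  · intro a ha
    have : a ∈ h.map (·.2) := (PySem.Set.mem_ofList _ _).1 ha
    simpa using this

lemma getDInit (h : List (String × Int)) (e : Int) :
    ((PySem.Set.ofList (h.map (·.2))).foldl
      (fun d element => d.insert element ([] : List String))
      (PySem.Dict.empty : PySem.Dict Int (List String))).getD e [] = [] := by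
  by_cases he : e ∈ PySem.Set.ofList (h.map (·.2))
  · exact PySem.Dict.getD_of_mem_items _
      (by rw [itemsInit]; exact List.mem_map.2 ⟨e, he, rfl⟩)
      (by rw [keysInit]; exact PySem.Set.nodup_ofList _) []
  · have hk : e ∉ (((PySem.Set.ofList (h.map (·.2))).foldl
        (fun d element => d.insert element ([] : List String))
        (PySem.Dict.empty : PySem.Dict Int (List String)))).keys := by
      rw [keysInit]; exact he
    simp [PySem.Dict.getD, PySem.Dict.get?_eq_none_iff_not_mem_keys _ _ |>.2 hk]

lemma getDResult (h : List (String × Int)) (e : Int) :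
    (h.foldl (fun d p => d.modify p.2 [] (fun letters => letters ++ [p.1]))
      ((PySem.Set.ofList (h.map (·.2))).foldl
        (fun d element => d.insert element ([] : List String))
        (PySem.Dict.empty : PySem.Dict Int (List String)))).getD e []
    = (h.filter (fun p => p.2 == e)).map (·.1) := by
  have hfold : h.foldl (fun d p => d.modify p.2 [] (fun letters => letters ++ [p.1]))
      ((PySem.Set.ofList (h.map (·.2))).foldl
        (fun d element => d.insert element ([] : List String))
        (PySem.Dict.empty : PySem.Dict Int (List String)))
      = (h.map (fun p => (p.2, p.1))).foldl
        (fun d q => d.modify q.1 [] (fun letters => letters ++ [q.2]))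
        ((PySem.Set.ofList (h.map (·.2))).foldl
          (fun d element => d.insert element ([] : List String))
          (PySem.Dict.empty : PySem.Dict Int (List String))) := by
    rw [List.foldl_map]
  rw [hfold, PySem.Dict.getD_foldl_modify_append, getDInit]
  simp [List.filter_map, Function.comp_def, List.map_map]

lemma lettersA_eq (h : List (String × Int)) (e : Int) :
    pvLettersA h e = (h.filter (fun p => p.2 == e)).map (·.1) := by
  have := PySem.List.foldl_append_if (fun p : String × Int => p.2 == e) (·.1) h []
  simpa [pvLettersA] using this

theorem final (h : List (String × Int)) :
    ((PySem.Set.ofList (h.map (·.2))).foldl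
      (fun inv element => inv.insert element (pvLettersA h element))
      (PySem.Dict.empty : PySem.Dict Int (List String))).items
    = (h.foldl (fun d p => d.modify p.2 [] (fun letters => letters ++ [p.1]))
      ((PySem.Set.ofList (h.map (·.2))).foldl
        (fun d element => d.insert element ([] : List String))
        (PySem.Dict.empty : PySem.Dict Int (List String)))).items := by
  rw [itemsA, PySem.Dict.items_eq_map_keys _ (by rw [keysResult]; exact PySem.Set.nodup_ofList _) [],
    keysResult]
  exact List.map_congr_left (fun e _ => by rw [getDResult, lettersA_eq])


-- ===== VERDICT (by name: the statement is the Claim_ definition above) =====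
theorem form_histogramma_inverted_spec : Claim_equal_form_histogramma_inverted := by
  intro histogramma _
  show form_histogramma_inverted histogramma = form_histogramma_inverted_alt histogramma
  simp only [form_histogramma_inverted, form_histogramma_inverted_alt]
  exact final histogramma
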